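-- pv_equiv track=rewrite | github.com/himanshusikarwar/dsa_problems | 11_closest_min_max.py | solve
-- ===== SOURCE A (Python) =====
-- def solve(A):
--     max_A = max(A)
--     min_A = min(A)
--     max_idx = -1
--     min_idx = -1
--     n = len(A)
--     ans = float('inf')
--     for i in range(n):
--         if A[i] == min_A:
--             min_idx = i
--         if A[i] == max_A:
--             max_idx = i
--         if max_idx != -1 and min_idx != -1:
--             ans = min(ans, abs(max_idx-min_idx) + 1)
--     return ans if ans != float('inf') else 0
-- ===== SOURCE B (Python) =====
-- def solve(A):
--     mn = min(A)
--     mx = max(A)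
--     if mn == mx:
--         return 1
--     mins = [i for i, v in enumerate(A) if v == mn]
--     maxs = [i for i, v in enumerate(A) if v == mx]
--     best = None
--     for p in mins:
--         for q in maxs:
--             d = abs(p - q)
--             if best is None or d < best:
--                 best = d
--     return best + 1
-- ===== Notes on version B (the rewrite author's own statement) =====
-- stated objective: alternative
-- what changed: B replaces A's single streaming pass (latest min/max indices updated at every step) by staged passes: compute min and max, build the two position lists, and take the minimum |p-q| over all min-position/max-position pairs by a nested loop, returning best+1 (early 1 when min==max).
import Mathlib
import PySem

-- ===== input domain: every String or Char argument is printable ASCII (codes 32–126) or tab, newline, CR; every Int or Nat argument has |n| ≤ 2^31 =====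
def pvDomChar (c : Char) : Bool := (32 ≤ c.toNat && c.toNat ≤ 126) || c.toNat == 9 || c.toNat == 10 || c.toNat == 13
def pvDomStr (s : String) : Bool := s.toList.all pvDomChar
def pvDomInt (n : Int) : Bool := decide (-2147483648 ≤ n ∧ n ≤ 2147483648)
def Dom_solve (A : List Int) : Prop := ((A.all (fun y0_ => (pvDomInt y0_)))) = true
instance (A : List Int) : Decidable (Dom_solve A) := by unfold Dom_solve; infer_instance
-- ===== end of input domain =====

-- B replaces A's single streaming pass by staged passes: position lists of the min and of the
-- max values, then the minimum |p - q| over all pairs by a nested loop (objective: alternative).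


-- ===== PORT A =====
-- the 'for i in range(n)' loop over A with state (min_idx, max_idx, ans); ans = none models float('inf')
def loopA (mn mx : Int) : List Int → Int → Int → Int → Option Int → Option Int
  | [], _, _, _, ans => ans
  | v :: t, i, mi, ma, ans =>
    let mi' := if v = mn then i else mi
    let ma' := if v = mx then i else ma
    let ans' := if ma' ≠ -1 ∧ mi' ≠ -1 then
        some (match ans with
              | none => |ma' - mi'| + 1
              | some a => min a (|ma' - mi'| + 1))
      else ans
    loopA mn mx t (i + 1) mi' ma' ans'

def solve (A : List Int) : Int :=
  match PySem.List.max? A (fun y => y), PySem.List.min? A (fun y => y) with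
  | some mx, some mn =>
    (match loopA mn mx A 0 (-1) (-1) none with
     | some a => a
     | none => 0)
  | _, _ => 0   -- unreachable under Pre_solve: Python's max([]) raises ValueError

-- ===== PORT B =====
-- '[i for i, v in enumerate(A) if v == x]' starting the index counter at k
def positions (x : Int) : List Int → Int → List Int
  | [], _ => []
  | v :: t, i => if v = x then i :: positions x t (i + 1) else positions x t (i + 1)

-- 'if best is None or d < best: best = d'
def updBest (best : Option Int) (d : Int) : Option Int :=
  if best.all (fun b => d < b) then some d else best

-- the inner 'for q in maxs' loop for a fixed p
def innerB (p : Int) : List Int → Option Int → Option Int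
  | [], best => best
  | q :: t, best => innerB p t (updBest best |p - q|)

-- the outer 'for p in mins' loop
def outerB (maxs : List Int) : List Int → Option Int → Option Int
  | [], best => best
  | p :: t, best => outerB maxs t (innerB p maxs best)

def solve_alt (A : List Int) : Int :=
  -- min([]) / max([]) raise ValueError in Python: the 0 defaults are unreachable under Pre_solve
  (PySem.List.min? A (fun y => y)).elim 0 (fun mn =>
    (PySem.List.max? A (fun y => y)).elim 0 (fun mx =>
      if mn = mx then 1
      else
        match outerB (positions mx A 0) (positions mn A 0) none with
        | some b => b + 1
        | none => 0))

-- ===== PRECONDITION & SPEC =====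
-- Pre_ excludes exactly the empty list, on which Python's max(A) raises ValueError (in A and in B alike).
def Pre_solve (A : List Int) : Prop := A ≠ []
instance (A : List Int) : Decidable (Pre_solve A) := by unfold Pre_solve; infer_instance
def pvWitness_solve : List Int := [1, 2]

def Spec_solve (A : List Int) (out : Int) : Prop := out = solve_alt A
instance (A : List Int) (out : Int) : Decidable (Spec_solve A out) := by unfold Spec_solve; infer_instance

-- ===== CLAIM (what is proved, stated in full; the proofs are below) =====
def Claim_equal_solve : Prop := ∀ (A : List Int), Dom_solve A → Pre_solve A → Spec_solve A (solve A)

-- ===== LEMMAS AND PROOFS =====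

-- the set of pair distances between an occurrence of mn and an occurrence of mx
def PairD (A : List Int) (mn mx d : Int) : Prop :=
  ∃ j k : Nat, A[j]? = some mn ∧ A[k]? = some mx ∧ d = |(j : Int) - (k : Int)|

-- r is the minimum of the set S (none iff S is empty)
def IsOMin (r : Option Int) (S : Int → Prop) : Prop :=
  match r with
  | none => ∀ d, ¬ S d
  | some a => S a ∧ ∀ d, S d → a ≤ d

lemma isOMin_congr {r : Option Int} {S T : Int → Prop}
    (h : IsOMin r S) (hiff : ∀ d, S d ↔ T d) : IsOMin r T := by
  cases r with
  | none => intro d hd; exact h d ((hiff d).mpr hd)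
  | some a => exact ⟨(hiff a).mp h.1, fun d hd => h.2 d ((hiff d).mpr hd)⟩

lemma isOMin_unique {r r' : Option Int} {S : Int → Prop}
    (h : IsOMin r S) (h' : IsOMin r' S) : r = r' := by
  cases r with
  | none =>
    cases r' with
    | none => rfl
    | some a => exact absurd h'.1 (h a)
  | some a =>
    cases r' with
    | none => exact absurd h.1 (h' a)
    | some b => exact congrArg some (le_antisymm (h.2 b h'.1) (h'.2 a h.1))

lemma updBest_spec {best : Option Int} {S : Int → Prop} (d : Int)
    (h : IsOMin best S) : IsOMin (updBest best d) (fun e => S e ∨ e = d) := by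
  cases best with
  | none =>
    simp only [updBest, Option.all_none]
    exact ⟨Or.inr rfl, fun e he => he.elim (fun hs => absurd hs (h e)) (fun he => le_of_eq he.symm)⟩
  | some a =>
    by_cases hlt : d < a
    · simp only [updBest, Option.all_some, if_pos (decide_eq_true hlt)]
      exact ⟨Or.inr rfl, fun e he => he.elim (fun hs => le_trans (by omega) (h.2 e hs)) (fun he => le_of_eq he.symm)⟩
    · have : ¬ ((some a).all (fun b => decide (d < b)) = true) := by simpa using hlt
      simp only [updBest, if_neg this]
      exact ⟨Or.inl h.1, fun e he => he.elim (h.2 e) (fun he => by omega)⟩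

lemma innerB_spec (p : Int) : ∀ (qs : List Int) (best : Option Int) (S : Int → Prop),
    IsOMin best S → IsOMin (innerB p qs best) (fun e => S e ∨ ∃ q ∈ qs, e = |p - q|) := by
  intro qs
  induction qs with
  | nil =>
    intro best S h
    exact isOMin_congr h (by simp)
  | cons q t ih =>
    intro best S h
    have h1 := ih (updBest best |p - q|) _ (updBest_spec |p - q| h)
    refine isOMin_congr h1 ?_
    intro d
    simp only [List.mem_cons]
    constructor
    · rintro (⟨hs | hd⟩ | ⟨q', hq', hd⟩)
      · exact Or.inl hs
      · exact Or.inr ⟨q, Or.inl rfl, hd⟩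
      · exact Or.inr ⟨q', Or.inr hq', hd⟩
    · rintro (hs | ⟨q', hq' | hq', hd⟩)
      · exact Or.inl (Or.inl hs)
      · exact Or.inl (Or.inr (hq' ▸ hd))
      · exact Or.inr ⟨q', hq', hd⟩

lemma outerB_spec (qs : List Int) : ∀ (ms : List Int) (best : Option Int) (S : Int → Prop),
    IsOMin best S → IsOMin (outerB qs ms best) (fun e => S e ∨ ∃ p ∈ ms, ∃ q ∈ qs, e = |p - q|) := by
  intro ms
  induction ms with
  | nil =>
    intro best S h
    exact isOMin_congr h (by simp)
  | cons p t ih =>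
    intro best S h
    have h1 := ih (innerB p qs best) _ (innerB_spec p qs best S h)
    refine isOMin_congr h1 ?_
    intro d
    simp only [List.mem_cons]
    constructor
    · rintro (⟨hs | ⟨q, hq, hd⟩⟩ | ⟨p', hp', q, hq, hd⟩)
      · exact Or.inl hs
      · exact Or.inr ⟨p, Or.inl rfl, q, hq, hd⟩
      · exact Or.inr ⟨p', Or.inr hp', q, hq, hd⟩
    · rintro (hs | ⟨p', hp' | hp', q, hq, hd⟩)
      · exact Or.inl (Or.inl hs)
      · exact Or.inl (Or.inr ⟨q, hq, hp' ▸ hd⟩)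
      · exact Or.inr ⟨p', hp', q, hq, hd⟩

lemma positions_mem (x : Int) :
    ∀ (l : List Int) (k i : Int), i ∈ positions x l k ↔ ∃ j : Nat, l[j]? = some x ∧ i = k + j := by
  intro l
  induction l with
  | nil => intro k i; simp [positions]
  | cons v t ih =>
    intro k i
    by_cases hv : v = x
    · simp only [positions, if_pos hv, List.mem_cons, ih (k + 1) i]
      constructor
      · rintro (rfl | ⟨j, hj, rfl⟩)
        · exact ⟨0, by simp [hv], by simp⟩
        · exact ⟨j + 1, by simpa using hj, by push_cast; ring⟩
      · rintro ⟨j, hj, rfl⟩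
        cases j with
        | zero => simp
        | succ j' =>
          right
          exact ⟨j', by simpa using hj, by push_cast; ring⟩
    · simp only [positions, if_neg hv, ih (k + 1) i]
      constructor
      · rintro ⟨j, hj, rfl⟩
        exact ⟨j + 1, by simpa using hj, by push_cast; ring⟩
      · rintro ⟨j, hj, rfl⟩
        cases j with
        | zero => simp at hj; exact absurd hj hv
        | succ j' => exact ⟨j', by simpa using hj, by push_cast; ring⟩

-- m is A's 'last index of value x so far' state: -1 if absent, else the last occurrence
def LastOcc (x : Int) (pre : List Int) (m : Int) : Prop :=
  (m = -1 ∧ ∀ j : Nat, pre[j]? ≠ some x) ∨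
  (∃ j : Nat, m = (j : Int) ∧ pre[j]? = some x ∧ ∀ k : Nat, j < k → pre[k]? ≠ some x)

lemma lastOcc_append (x v : Int) (pre : List Int) (m : Int) (h : LastOcc x pre m) :
    LastOcc x (pre ++ [v]) (if v = x then (pre.length : Int) else m) := by
  by_cases hv : v = x
  · rw [if_pos hv]
    right
    refine ⟨pre.length, rfl, by simp [hv], ?_⟩
    intro k hk
    rw [List.getElem?_append_right (by omega)]
    rw [List.getElem?_eq_none_iff.mpr (by simp; omega)]
    simp
  · rw [if_neg hv]
    rcases h with ⟨rfl, hnone⟩ | ⟨j, rfl, hj, hlast⟩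
    · left
      refine ⟨rfl, fun j => ?_⟩
      by_cases hjl : j < pre.length
      · rw [List.getElem?_append_left hjl]; exact hnone j
      · by_cases hje : j = pre.length
        · subst hje
          rw [List.getElem?_append_right (le_refl _), Nat.sub_self]
          simpa using hv
        · rw [List.getElem?_eq_none_iff.mpr (by simp; omega)]; simp
    · right
      have hjl : j < pre.length := (List.getElem?_eq_some_iff.mp hj).1
      refine ⟨j, rfl, by rwa [List.getElem?_append_left hjl], ?_⟩
      intro k hk
      by_cases hkl : k < pre.length
      · rw [List.getElem?_append_left hkl]; exact hlast k hk
      · by_cases hke : k = pre.length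
        · subst hke; simpa [List.getElem?_append_right (le_refl _)] using hv
        · rw [List.getElem?_eq_none_iff.mpr (by simp; omega)]; simp

lemma lastOcc_mem {x : Int} {pre : List Int} {m : Int} (h : LastOcc x pre m) (hm : m ≠ -1) :
    ∃ j : Nat, m = (j : Int) ∧ pre[j]? = some x ∧ ∀ k : Nat, pre[k]? = some x → k ≤ j := by
  rcases h with ⟨rfl, _⟩ | ⟨j, rfl, hj, hlast⟩
  · exact absurd rfl hm
  · exact ⟨j, rfl, hj, fun k hk => by by_contra hlt; exact hlast k (by omega) hk⟩

lemma lastOcc_none {x : Int} {pre : List Int} {m : Int} (h : LastOcc x pre m) (hm : m = -1) :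
    ∀ j : Nat, pre[j]? ≠ some x := by
  rcases h with ⟨_, hnone⟩ | ⟨j, rfl, _, _⟩
  · exact hnone
  · omega

-- PairD over pre ++ [v] decomposes into old pairs and pairs using position pre.length
lemma pairD_append (pre : List Int) (v mn mx d : Int) (hne : mn ≠ mx) :
    PairD (pre ++ [v]) mn mx d ↔
      PairD pre mn mx d ∨
      (v = mn ∧ ∃ k : Nat, pre[k]? = some mx ∧ d = |(pre.length : Int) - k|) ∨
      (v = mx ∧ ∃ j : Nat, pre[j]? = some mn ∧ d = |(j : Int) - pre.length|) := by
  have hlk : ∀ (i : Nat) (y : Int), (pre ++ [v])[i]? = some y ↔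
      (i < pre.length ∧ pre[i]? = some y) ∨ (i = pre.length ∧ v = y) := by
    intro i y
    rcases lt_trichotomy i pre.length with hi | hi | hi
    · rw [List.getElem?_append_left hi]
      constructor
      · exact fun h => Or.inl ⟨hi, h⟩
      · rintro (⟨_, h⟩ | ⟨he, _⟩)
        · exact h
        · omega
    · subst hi
      rw [List.getElem?_append_right (le_refl _), Nat.sub_self]
      constructor
      · intro h
        exact Or.inr ⟨rfl, by simpa using h⟩
      · rintro (⟨h, _⟩ | ⟨_, h⟩)
        · omega
        · simp [h]
    · rw [List.getElem?_eq_none_iff.mpr (by simp; omega)]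
      constructor
      · intro h; simp at h
      · rintro (⟨h, _⟩ | ⟨h, _⟩) <;> omega
  constructor
  · rintro ⟨j, k, hj, hk, rfl⟩
    rcases (hlk j mn).mp hj with ⟨hjl, hj'⟩ | ⟨rfl, rfl⟩
    · rcases (hlk k mx).mp hk with ⟨hkl, hk'⟩ | ⟨rfl, rfl⟩
      · exact Or.inl ⟨j, k, hj', hk', rfl⟩
      · exact Or.inr (Or.inr ⟨rfl, j, hj', rfl⟩)
    · rcases (hlk k mx).mp hk with ⟨hkl, hk'⟩ | ⟨rfl, hvmx⟩
      · exact Or.inr (Or.inl ⟨rfl, k, hk', rfl⟩)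
      · exact absurd hvmx hne
  · rintro (⟨j, k, hj, hk, rfl⟩ | ⟨hvn, k, hk, rfl⟩ | ⟨hvx, j, hj, rfl⟩)
    · have hjl := (List.getElem?_eq_some_iff.mp hj).1
      have hkl := (List.getElem?_eq_some_iff.mp hk).1
      exact ⟨j, k, (hlk j mn).mpr (Or.inl ⟨hjl, hj⟩), (hlk k mx).mpr (Or.inl ⟨hkl, hk⟩), rfl⟩
    · have hkl := (List.getElem?_eq_some_iff.mp hk).1
      exact ⟨pre.length, k, (hlk pre.length mn).mpr (Or.inr ⟨rfl, hvn⟩),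
        (hlk k mx).mpr (Or.inl ⟨hkl, hk⟩), by simp⟩
    · have hjl := (List.getElem?_eq_some_iff.mp hj).1
      exact ⟨j, pre.length, (hlk j mn).mpr (Or.inl ⟨hjl, hj⟩),
        (hlk pre.length mx).mpr (Or.inr ⟨rfl, hvx⟩), by simp⟩

-- one-step unfolding of A's loop
lemma loopA_cons (mn mx v i mi ma : Int) (t : List Int) (ans : Option Int) :
    loopA mn mx (v :: t) i mi ma ans =
    loopA mn mx t (i + 1) (if v = mn then i else mi) (if v = mx then i else ma)
      (if (if v = mx then i else ma) ≠ -1 ∧ (if v = mn then i else mi) ≠ -1 then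
        some (match ans with
              | none => |(if v = mx then i else ma) - (if v = mn then i else mi)| + 1
              | some a => min a (|(if v = mx then i else ma) - (if v = mn then i else mi)| + 1))
      else ans) := rfl

-- main invariant: A's running ans (shifted down by the '+1') is the minimum of the pair distances
lemma loopA_inv (mn mx : Int) (hne : mn ≠ mx) :
    ∀ (l pre : List Int) (mi ma : Int) (ans : Option Int),
      LastOcc mn pre mi → LastOcc mx pre ma →
      IsOMin (ans.map (fun a => a - 1)) (PairD pre mn mx) →
      IsOMin ((loopA mn mx l (pre.length : Int) mi ma ans).map (fun a => a - 1))
        (PairD (pre ++ l) mn mx) := by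
  intro l
  induction l with
  | nil =>
    intro pre mi ma ans _ _ hans
    simpa [loopA] using hans
  | cons v t ih =>
    intro pre mi ma ans hmi hma hans
    have hmi' := lastOcc_append mn v pre mi hmi
    have hma' := lastOcc_append mx v pre ma hma
    have hlen : ((pre ++ [v]).length : Int) = (pre.length : Int) + 1 := by simp
    have hstep : pre ++ v :: t = (pre ++ [v]) ++ t := by simp
    rw [hstep]
    rw [loopA_cons]
    rw [← hlen]
    apply ih (pre ++ [v]) _ _ _ hmi' hma'
    -- remains: the updated ans is the minimum of PairD (pre ++ [v])
    by_cases hvmn : v = mn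
    · have hvmx : ¬ v = mx := fun h => hne (hvmn ▸ h ▸ rfl)
      rw [if_pos hvmn, if_neg hvmx]
      have hlp : ¬ ((pre.length : Int) = -1) := by omega
      by_cases hmae : ma = -1
      · -- no max in pre: no new pairs
        rw [if_neg (by simp [hmae])]
        refine isOMin_congr hans ?_
        intro d
        rw [pairD_append pre v mn mx d hne]
        have hnomx := lastOcc_none hma hmae
        constructor
        · exact Or.inl
        · rintro (h | ⟨_, k, hk, _⟩ | ⟨hvmx', _⟩)
          · exact h
          · exact absurd hk (hnomx k)
          · exact absurd hvmx' hvmx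
      · rw [if_pos ⟨hmae, fun h => hlp (by omega)⟩]
        obtain ⟨jm, hjm_eq, hjm, hjm_last⟩ := lastOcc_mem hma hmae
        have hjml : jm < pre.length := (List.getElem?_eq_some_iff.mp hjm).1
        have habs : |ma - (pre.length : Int)| = (pre.length : Int) - jm := by
          rw [hjm_eq, abs_sub_comm]
          exact abs_of_nonneg (by omega)
        -- new candidate distance
        have hcand : PairD (pre ++ [v]) mn mx ((pre.length : Int) - jm) := by
          rw [pairD_append pre v mn mx _ hne]
          exact Or.inr (Or.inl ⟨hvmn, jm, hjm, by rw [abs_of_nonneg (by omega : (0:Int) ≤ (pre.length : Int) - jm)]⟩)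
        -- any new pair distance is at least the candidate
        have hbound : ∀ k : Nat, pre[k]? = some mx →
            (pre.length : Int) - jm ≤ |(pre.length : Int) - k| := by
          intro k hk
          have hkj := hjm_last k hk
          have hkl := (List.getElem?_eq_some_iff.mp hk).1
          rw [abs_of_nonneg (by omega : (0:Int) ≤ (pre.length : Int) - k)]
          omega
        cases ans with
        | none =>
          have hempty : ∀ d, ¬ PairD pre mn mx d := by simpa [IsOMin] using hans
          simp only [Option.map_some]
          constructor
          · simpa [habs] using hcand
          · intro d hd
            rw [pairD_append pre v mn mx d hne] at hd
            rcases hd with h | ⟨_, k, hk, rfl⟩ | ⟨hvmx', _⟩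
            · exact absurd h (hempty d)
            · have := hbound k hk; omega
            · exact absurd hvmx' hvmx
        | some a =>
          simp only [Option.map_some] at hans ⊢
          obtain ⟨hmem, hmin⟩ := hans
          constructor
          · rcases le_or_gt a (|ma - (pre.length : Int)| + 1) with h | h
            · have : min a (|ma - (pre.length : Int)| + 1) = a := min_eq_left h
              rw [this, pairD_append pre v mn mx _ hne]
              exact Or.inl hmem
            · have : min a (|ma - (pre.length : Int)| + 1) = |ma - (pre.length : Int)| + 1 :=
                min_eq_right (by omega)
              rw [this]
              simpa [habs] using hcand
          · intro d hd
            rw [pairD_append pre v mn mx d hne] at hd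
            rcases hd with h | ⟨_, k, hk, rfl⟩ | ⟨hvmx', _⟩
            · have := hmin d h; omega
            · have := hbound k hk; rw [habs]; omega
            · exact absurd hvmx' hvmx
    · by_cases hvmx : v = mx
      · -- symmetric: v is the max value
        rw [if_pos hvmx, if_neg hvmn]
        have hlp : ¬ ((pre.length : Int) = -1) := by omega
        by_cases hmie : mi = -1
        · rw [if_neg (by simp [hmie])]
          refine isOMin_congr hans ?_
          intro d
          rw [pairD_append pre v mn mx d hne]
          have hnomn := lastOcc_none hmi hmie
          constructor
          · exact Or.inl
          · rintro (h | ⟨hvmn', _⟩ | ⟨_, j, hj, _⟩)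
            · exact h
            · exact absurd hvmn' hvmn
            · exact absurd hj (hnomn j)
        · rw [if_pos ⟨fun h => hlp (by omega), hmie⟩]
          obtain ⟨jn, hjn_eq, hjn, hjn_last⟩ := lastOcc_mem hmi hmie
          have hjnl : jn < pre.length := (List.getElem?_eq_some_iff.mp hjn).1
          have habs : |(pre.length : Int) - mi| = (pre.length : Int) - jn := by
            rw [hjn_eq]
            exact abs_of_nonneg (by omega)
          have hcand : PairD (pre ++ [v]) mn mx ((pre.length : Int) - jn) := by
            rw [pairD_append pre v mn mx _ hne]
            exact Or.inr (Or.inr ⟨hvmx, jn, hjn, by rw [abs_sub_comm, abs_of_nonneg (by omega : (0:Int) ≤ (pre.length : Int) - jn)]⟩)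
          have hbound : ∀ j : Nat, pre[j]? = some mn →
              (pre.length : Int) - jn ≤ |(j : Int) - (pre.length : Int)| := by
            intro j hj
            have hkj := hjn_last j hj
            have hkl := (List.getElem?_eq_some_iff.mp hj).1
            rw [abs_sub_comm, abs_of_nonneg (by omega : (0:Int) ≤ (pre.length : Int) - j)]
            omega
          cases ans with
          | none =>
            have hempty : ∀ d, ¬ PairD pre mn mx d := by simpa [IsOMin] using hans
            simp only [Option.map_some]
            constructor
            · simpa [habs] using hcand
            · intro d hd
              rw [pairD_append pre v mn mx d hne] at hd
              rcases hd with h | ⟨hvmn', _⟩ | ⟨_, j, hj, rfl⟩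
              · exact absurd h (hempty d)
              · exact absurd hvmn' hvmn
              · have := hbound j hj; omega
          | some a =>
            simp only [Option.map_some] at hans ⊢
            obtain ⟨hmem, hmin⟩ := hans
            constructor
            · rcases le_or_gt a (|(pre.length : Int) - mi| + 1) with h | h
              · rw [min_eq_left h, pairD_append pre v mn mx _ hne]
                exact Or.inl hmem
              · rw [min_eq_right (by omega)]
                simpa [habs] using hcand
            · intro d hd
              rw [pairD_append pre v mn mx d hne] at hd
              rcases hd with h | ⟨hvmn', _⟩ | ⟨_, j, hj, rfl⟩
              · have := hmin d h; omega
              · exact absurd hvmn' hvmn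
              · have := hbound j hj; rw [habs]; omega
      · -- v is neither: the pair set is unchanged and A's re-update is a no-op on the minimum
        rw [if_neg hvmn, if_neg hvmx]
        have hsame : ∀ d, PairD pre mn mx d ↔ PairD (pre ++ [v]) mn mx d := by
          intro d
          rw [pairD_append pre v mn mx d hne]
          constructor
          · exact Or.inl
          · rintro (h | ⟨hvmn', _⟩ | ⟨hvmx', _⟩)
            · exact h
            · exact absurd hvmn' hvmn
            · exact absurd hvmx' hvmx
        by_cases hboth : ma ≠ -1 ∧ mi ≠ -1
        · rw [if_pos hboth]
          obtain ⟨jm, hjm_eq, hjm, _⟩ := lastOcc_mem hma hboth.1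
          obtain ⟨jn, hjn_eq, hjn, _⟩ := lastOcc_mem hmi hboth.2
          have hpair : PairD pre mn mx (|ma - mi|) := by
            refine ⟨jn, jm, hjn, hjm, ?_⟩
            rw [hjm_eq, hjn_eq, abs_sub_comm]
          cases ans with
          | none =>
            have hno : ∀ d, ¬ PairD pre mn mx d := by simpa [IsOMin] using hans
            exact absurd hpair (hno _)
          | some a =>
            simp only [Option.map_some] at hans ⊢
            obtain ⟨hmem, hmin⟩ := hans
            have hle : a ≤ |ma - mi| + 1 := by have := hmin _ hpair; omega
            rw [min_eq_left hle]
            exact ⟨(hsame _).mp hmem, fun d hd => hmin d ((hsame d).mpr hd)⟩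
        · rw [if_neg hboth]
          exact isOMin_congr hans hsame

-- when every element equals mn (= mx), A's loop keeps ans = 1
lemma loopA_allEq (mn : Int) :
    ∀ (t : List Int) (i j : Int), (∀ y ∈ t, y = mn) → 0 ≤ i →
      loopA mn mn t i j j (some 1) = some 1 := by
  intro t
  induction t with
  | nil => intro i j _ _; rfl
  | cons v t ih =>
    intro i j hall hi
    have hv : v = mn := hall v (by simp)
    rw [hv]
    have hi' : ¬ i = -1 := by omega
    simp only [loopA]
    simp [hi']
    exact ih (i + 1) i (fun y hy => hall y (by simp [hy])) (by omega)

lemma loopA_start (mn v : Int) (t : List Int) (h : ∀ y ∈ v :: t, y = mn) :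
    loopA mn mn (v :: t) 0 (-1) (-1) none = some 1 := by
  have hv : v = mn := h v (by simp)
  rw [hv]
  simp only [loopA]
  simp
  exact loopA_allEq mn t 1 0 (fun y hy => h y (by simp [hy])) (by omega)

-- ===== VERDICT (by name: the statement is the Claim_ definition above) =====
theorem solve_spec : Claim_equal_solve := by
  intro A _ hpre
  unfold Spec_solve
  obtain ⟨mx, hmx⟩ : ∃ m, PySem.List.max? A (fun y => y) = some m := by
    cases h : PySem.List.max? A (fun y => y) with
    | none => exact absurd ((PySem.List.max?_eq_none_iff A (fun y => y)).mp h) hpre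
    | some m => exact ⟨m, rfl⟩
  obtain ⟨mn, hmn⟩ : ∃ m, PySem.List.min? A (fun y => y) = some m := by
    cases h : PySem.List.min? A (fun y => y) with
    | none => exact absurd ((PySem.List.min?_eq_none_iff A (fun y => y)).mp h) hpre
    | some m => exact ⟨m, rfl⟩
  unfold solve solve_alt
  simp only [hmx, hmn, Option.elim_some]
  by_cases he : mn = mx
  · rw [if_pos he, ← he]
    have hall : ∀ y ∈ A, y = mn := by
      intro y hy
      have h1 : mn ≤ y := by simpa using PySem.List.min?_isMin hmn y hy
      have h2 : y ≤ mx := by simpa using PySem.List.max?_isMax hmx y hy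
      omega
    match A, hpre with
    | v :: t, _ => rw [loopA_start mn v t hall]
  · rw [if_neg he]
    -- A's loop result is the minimum of the pair distances (shifted by 1)
    have hA := loopA_inv mn mx he A [] (-1) (-1) none
      (Or.inl ⟨rfl, by simp⟩) (Or.inl ⟨rfl, by simp⟩) (by intro d ⟨j, k, hj, _⟩; simp at hj)
    simp only [List.nil_append, List.length_nil, Nat.cast_zero] at hA
    -- B's nested loop result is the same minimum
    have hB := outerB_spec (positions mx A 0) (positions mn A 0) none (fun _ => False)
      (by intro d h; exact h)
    have hB' : IsOMin (outerB (positions mx A 0) (positions mn A 0) none) (PairD A mn mx) := by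
      refine isOMin_congr hB ?_
      intro d
      simp only [false_or]
      constructor
      · rintro ⟨p, hp, q, hq, rfl⟩
        obtain ⟨j, hj, rfl⟩ := (positions_mem mn A 0 p).mp hp
        obtain ⟨k, hk, rfl⟩ := (positions_mem mx A 0 q).mp hq
        exact ⟨j, k, hj, hk, by simp⟩
      · rintro ⟨j, k, hj, hk, rfl⟩
        exact ⟨(j : Int), (positions_mem mn A 0 _).mpr ⟨j, hj, by simp⟩,
          (k : Int), (positions_mem mx A 0 _).mpr ⟨k, hk, by simp⟩, by simp⟩
    have heq := isOMin_unique hA hB'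
    -- both minima are some value: mn and mx both occur in A
    obtain ⟨jn, hjn⟩ := List.mem_iff_getElem?.mp (PySem.List.min?_mem hmn)
    obtain ⟨jx, hjx⟩ := List.mem_iff_getElem?.mp (PySem.List.max?_mem hmx)
    have hpair : PairD A mn mx (|(jn : Int) - (jx : Int)|) := ⟨jn, jx, hjn, hjx, rfl⟩
    cases hr : loopA mn mx A 0 (-1) (-1) none with
    | none =>
      rw [hr] at hA
      have hno : ∀ d, ¬ PairD A mn mx d := by simpa [IsOMin] using hA
      exact absurd hpair (hno _)
    | some a =>
      rw [hr] at heq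
      simp only [Option.map_some] at heq
      rw [← heq]
      simp
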